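-- pv_equiv track=rewrite | github.com/2HyeokJun/coding_test_repo | 백준/Silver/27931. Parity Constraint Closest Pair （Easy）/Parity Constraint Closest Pair （Easy）.py | solution
-- ===== SOURCE A (Python) =====
-- import math
--
-- def _is_odd(number):
--     return number % 2 != 0
--
-- def solution(n, array):
--     array.sort()
--     min_even_diff = math.inf
--     min_odd_diff = math.inf
--     odd_diff_array = []
--
--     for i in range(n - 1):
--         diff = abs(array[i+1] - array[i])
--         if _is_odd(diff):
--             min_odd_diff = min(min_odd_diff, diff)
--             odd_diff_array.append(diff)
--         else:
--             min_even_diff = min(min_even_diff, diff)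
--
--     min_odd_diff = -1 if min_odd_diff == math.inf else min_odd_diff
--
--     if min_even_diff != math.inf:
--         return f"{min_even_diff} {min_odd_diff}"
--
--     # 짝수차가 없을때 계산하는 로직
--
--     if len(odd_diff_array) < 2:
--         min_even_diff = -1
--     else:
--         min_odd_dif_sum = odd_diff_array[0] + odd_diff_array[1]
--         for i in range(len(odd_diff_array) - 1):
--             min_odd_dif_sum = min(min_odd_dif_sum, odd_diff_array[i] + odd_diff_array[i+1])
--         min_even_diff = min_odd_dif_sum
--
--     return f"{min_even_diff} {min_odd_diff}"
-- ===== SOURCE B (Python) =====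
-- def solution(n, array):
--     s = sorted(array)[:max(0, n)]
--     me = mo = sp = None          # running min even adj diff, min odd adj diff, min two-apart span
--     p2 = p1 = None               # the previous two elements of the stream
--     for x in s:
--         if p1 is not None:
--             d = x - p1
--             if d % 2 != 0:
--                 mo = d if mo is None or d < mo else mo
--             else:
--                 me = d if me is None or d < me else me
--         if p2 is not None:
--             t = x - p2
--             sp = t if sp is None or t < sp else sp
--         p2, p1 = p1, x
--     mo_out = -1 if mo is None else mo
--     if me is not None:
--         return f"{me} {mo_out}"
--     return f"{-1 if sp is None else sp} {mo_out}"
-- ===== Notes on version B (the rewrite author's own statement) =====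
-- stated objective: alternative
-- what changed: A stages the work: one indexed loop classifies each adjacent diff of the sorted array while storing the odd diffs in a list, then a second loop rescans that list for the minimum sum of two consecutive odd diffs; B is a single fused streaming pass over the sorted prefix that keeps only five scalars (the previous two elements and three running minima: even adjacent diff, odd adjacent diff, and two-apart span s[i]-s[i-2], the span minimum replacing A's stored-list rescan), with no index arithmetic, no intermediate list and no second phase.
import Mathlib
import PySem

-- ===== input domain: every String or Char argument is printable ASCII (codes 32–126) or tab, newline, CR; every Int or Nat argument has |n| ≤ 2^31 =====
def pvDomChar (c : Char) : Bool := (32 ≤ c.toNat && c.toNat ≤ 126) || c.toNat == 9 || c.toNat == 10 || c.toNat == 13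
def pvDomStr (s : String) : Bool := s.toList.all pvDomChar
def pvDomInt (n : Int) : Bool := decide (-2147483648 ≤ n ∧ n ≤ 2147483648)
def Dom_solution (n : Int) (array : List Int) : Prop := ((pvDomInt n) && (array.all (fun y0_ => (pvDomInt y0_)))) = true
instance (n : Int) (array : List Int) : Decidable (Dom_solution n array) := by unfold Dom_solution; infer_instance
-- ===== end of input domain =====

-- B replaces A's staged computation (classify each adjacent diff while storing the odd ones, then
-- rescan the stored list for pair sums) by ONE fused streaming pass over the sorted prefix that keeps
-- only scalars: the previous two elements and three running minima (even diff, odd diff, two-apart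
-- span); equivalence is about the RETURN value only (A sorts `array` in place, B does not mutate it).

-- ===== PORT A =====
-- min(x_or_inf, d) with `none` playing math.inf
def pvMinOpt (o : Option Int) (d : Int) : Int := o.elim d (fun v => min v d)

def solution (n : Int) (array : List Int) : String :=
  let s := PySem.List.sorted array (fun x => x) false
  let st := (PySem.List.pyRange 0 (n - 1) 1).foldl
    (fun (st : Option Int × Option Int × List Int) i =>
      let diff := |PySem.List.pyGetD s (i + 1) 0 - PySem.List.pyGetD s i 0|
      if PySem.Int.mod diff 2 ≠ 0 then
        (st.1, some (pvMinOpt st.2.1 diff), st.2.2 ++ [diff])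
      else
        (some (pvMinOpt st.1 diff), st.2.1, st.2.2))
    (none, none, [])
  let minOdd : Int := match st.2.1 with | none => -1 | some v => v
  match st.1 with
  | some v => PySem.Int.toStr v ++ " " ++ PySem.Int.toStr minOdd
  | none =>
    let ol := st.2.2
    if ol.length < 2 then
      PySem.Int.toStr (-1) ++ " " ++ PySem.Int.toStr minOdd
    else
      let sum0 := PySem.List.pyGetD ol 0 0 + PySem.List.pyGetD ol 1 0
      let minSum := (PySem.List.pyRange 0 ((ol.length : Int) - 1) 1).foldl
        (fun acc i => min acc (PySem.List.pyGetD ol i 0 + PySem.List.pyGetD ol (i + 1) 0)) sum0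
      PySem.Int.toStr minSum ++ " " ++ PySem.Int.toStr minOdd

-- ===== PORT B =====
-- `d if cur is None or d < cur else cur`
def bUpd (cur : Option Int) (d : Int) : Option Int :=
  match cur with
  | none => some d
  | some c => if d < c then some d else some c

-- one iteration of B's fused loop; state = (me, mo, sp, p2, p1)
def bStep (st : Option Int × Option Int × Option Int × Option Int × Option Int) (x : Int) :
    Option Int × Option Int × Option Int × Option Int × Option Int :=
  let me := st.1
  let mo := st.2.1
  let sp := st.2.2.1
  let p2 := st.2.2.2.1
  let p1 := st.2.2.2.2
  let em : Option Int × Option Int :=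
    match p1 with
    | none => (me, mo)
    | some p =>
      let d := x - p
      if PySem.Int.mod d 2 ≠ 0 then (me, bUpd mo d) else (bUpd me d, mo)
  let sp' : Option Int :=
    match p2 with
    | none => sp
    | some q => bUpd sp (x - q)
  (em.1, em.2, sp', p1, some x)

def solution_alt (n : Int) (array : List Int) : String :=
  let s := (PySem.List.sorted array (fun x => x) false).take n.toNat
  let st := s.foldl bStep (none, none, none, none, none)
  let moOut : Int := match st.2.1 with | none => -1 | some v => v
  match st.1 with
  | some v => PySem.Int.toStr v ++ " " ++ PySem.Int.toStr moOut
  | none =>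
    let ev : Int := match st.2.2.1 with | none => -1 | some v => v
    PySem.Int.toStr ev ++ " " ++ PySem.Int.toStr moOut

-- ===== PRECONDITION & SPEC =====
-- Pre_ excludes exactly the inputs where A raises IndexError: n ≥ 2 together with n > len(array)
-- (the loop then reads array[n-1] past the end).
def Pre_solution (n : Int) (array : List Int) : Prop := n ≤ (array.length : Int) ∨ n ≤ 1
instance (n : Int) (array : List Int) : Decidable (Pre_solution n array) := by
  unfold Pre_solution; infer_instance

def pvWitness_solution : Int × List Int := (4, [5, 1, 8, 2])

def Spec_solution (n : Int) (array : List Int) (out : String) : Prop := out = solution_alt n array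
instance (n : Int) (array : List Int) (out : String) : Decidable (Spec_solution n array out) := by unfold Spec_solution; infer_instance

-- ===== CLAIM (what is proved, stated in full; the proofs are below) =====
def Claim_equal_solution : Prop := ∀ (n : Int) (array : List Int), Dom_solution n array → Pre_solution n array → Spec_solution n array (solution n array)
-- ===== LEMMAS AND PROOFS =====

-- running optional minimum over a list equals min? on that list
theorem pv_foldl_minOpt_some (t : List Int) (v : Int) :
    t.foldl (fun o d => some (pvMinOpt o d)) (some v) = some (t.foldl min v) := by
  induction t generalizing v with
  | nil => rfl
  | cons x xs ih => simpa [List.foldl, pvMinOpt] using ih (min v x)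

theorem pv_foldl_minOpt_none (L : List Int) :
    L.foldl (fun o d => some (pvMinOpt o d)) none = PySem.List.min? L (fun x => x) := by
  cases L with
  | nil => rfl
  | cons x xs =>
    have := pv_foldl_minOpt_some xs x
    simpa [List.foldl, pvMinOpt, PySem.List.min?_id_cons] using this

theorem bUpd_eq (o : Option Int) (d : Int) : bUpd o d = some (pvMinOpt o d) := by
  cases o with
  | none => rfl
  | some v =>
    simp only [bUpd, pvMinOpt, Option.elim]
    split_ifs with h <;> simp [min_def] <;> omega

theorem bUpd_funext : bUpd = fun (o : Option Int) (d : Int) => some (pvMinOpt o d) :=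
  funext fun o => funext fun d => bUpd_eq o d

theorem foldl_bUpd_none (L : List Int) :
    L.foldl bUpd none = PySem.List.min? L (fun x => x) := by
  rw [bUpd_funext]; exact pv_foldl_minOpt_none L

theorem foldl_bUpd_some (L : List Int) (v : Int) :
    L.foldl bUpd (some v) = PySem.List.min? (v :: L) (fun x => x) := by
  rw [bUpd_funext, pv_foldl_minOpt_some, PySem.List.min?_id_cons]

-- A's single loop, decomposed: its state is the even-min fold, the odd-min fold, and the odd diffs
theorem pv_core (L : List Int) (me mo : Option Int) (ol : List Int) :
    L.foldl
      (fun (st : Option Int × Option Int × List Int) d =>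
        if PySem.Int.mod d 2 ≠ 0 then
          (st.1, some (pvMinOpt st.2.1 d), st.2.2 ++ [d])
        else
          (some (pvMinOpt st.1 d), st.2.1, st.2.2)) (me, mo, ol)
    = ((L.filter (fun d => decide (PySem.Int.mod d 2 = 0))).foldl (fun o d => some (pvMinOpt o d)) me,
       (L.filter (fun d => decide (PySem.Int.mod d 2 ≠ 0))).foldl (fun o d => some (pvMinOpt o d)) mo,
       ol ++ L.filter (fun d => decide (PySem.Int.mod d 2 ≠ 0))) := by
  induction L generalizing me mo ol with
  | nil => simp
  | cons x xs ih =>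
    by_cases h : PySem.Int.mod x 2 = 0
    · have hx : x % 2 = 0 := by
        have := PySem.Int.mod_eq_emod_of_pos (a := x) (b := 2) (by norm_num)
        omega
      have h2 : (2 : Int) ∣ x := Int.dvd_of_emod_eq_zero hx
      rw [List.foldl_cons, if_neg (not_not_intro h), ih]
      simp [hx, h2]
    · have hx : x % 2 = 1 := by
        have h1 := PySem.Int.mod_eq_emod_of_pos (a := x) (b := 2) (by norm_num)
        have h2 := Int.emod_two_eq x
        omega
      have h2 : ¬ (2 : Int) ∣ x := by
        rw [Int.dvd_iff_emod_eq_zero]; omega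
      rw [List.foldl_cons, if_pos h, ih]
      simp [hx, h2]

theorem pv_filter_all (L : List Int) (h : L.filter (fun d => decide (PySem.Int.mod d 2 = 0)) = []) :
    L.filter (fun d => decide (PySem.Int.mod d 2 ≠ 0)) = L := by
  rw [List.filter_eq_self]
  intro a ha
  have := List.filter_eq_nil_iff.mp h a ha
  simpa using this

-- replacing |s[i+1]-s[i]| by s[i+1]-s[i] turns A's loop into a fold over the difference list
theorem pv_loopshape (s : List Int) (l : List Int) (init : Option Int × Option Int × List Int)
    (habs : ∀ i ∈ l, |PySem.List.pyGetD s (i + 1) 0 - PySem.List.pyGetD s i 0|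
        = PySem.List.pyGetD s (i + 1) 0 - PySem.List.pyGetD s i 0) :
    l.foldl
      (fun (st : Option Int × Option Int × List Int) i =>
        let diff := |PySem.List.pyGetD s (i + 1) 0 - PySem.List.pyGetD s i 0|
        if PySem.Int.mod diff 2 ≠ 0 then
          (st.1, some (pvMinOpt st.2.1 diff), st.2.2 ++ [diff])
        else
          (some (pvMinOpt st.1 diff), st.2.1, st.2.2)) init
    = (l.map (fun i => PySem.List.pyGetD s (i + 1) 0 - PySem.List.pyGetD s i 0)).foldl
      (fun (st : Option Int × Option Int × List Int) d =>
        if PySem.Int.mod d 2 ≠ 0 then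
          (st.1, some (pvMinOpt st.2.1 d), st.2.2 ++ [d])
        else
          (some (pvMinOpt st.1 d), st.2.1, st.2.2)) init := by
  revert habs
  induction l generalizing init with
  | nil => intro _; rfl
  | cons x xs ih =>
    intro habs
    have hx := habs x List.mem_cons_self
    simp only [List.foldl_cons, List.map_cons, hx]
    exact ih _ (fun i hi => habs i (List.mem_cons_of_mem x hi))

-- a running min over rewritten summands is the fold of min over the mapped list
theorem pv_fold_min_map (l : List Int) (P Q : Int → Int) (init : Int)
    (h : ∀ i ∈ l, P i = Q i) :
    l.foldl (fun acc i => min acc (P i)) init = (l.map Q).foldl min init := by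
  revert h
  induction l generalizing init with
  | nil => intro _; rfl
  | cons x xs ih =>
    intro h
    simp only [List.foldl_cons, List.map_cons, h x List.mem_cons_self]
    exact ih _ (fun i hi => h i (List.mem_cons_of_mem x hi))

-- the all-odd fallback: A's pair-sum minimum equals the direct min of s[i+2]-s[i]
theorem pv_fallback (s : List Int) (m : Int)
    (hm : 2 ≤ ((PySem.List.pyRange 0 m 1).map
      (fun i => PySem.List.pyGetD s (i + 1) 0 - PySem.List.pyGetD s i 0)).length) :
    (PySem.List.pyRange 0 ((((PySem.List.pyRange 0 m 1).map
        (fun i => PySem.List.pyGetD s (i + 1) 0 - PySem.List.pyGetD s i 0)).length : Int) - 1) 1).foldl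
      (fun acc i => min acc
        (PySem.List.pyGetD ((PySem.List.pyRange 0 m 1).map
          (fun i => PySem.List.pyGetD s (i + 1) 0 - PySem.List.pyGetD s i 0)) i 0
         + PySem.List.pyGetD ((PySem.List.pyRange 0 m 1).map
          (fun i => PySem.List.pyGetD s (i + 1) 0 - PySem.List.pyGetD s i 0)) (i + 1) 0))
      (PySem.List.pyGetD ((PySem.List.pyRange 0 m 1).map
          (fun i => PySem.List.pyGetD s (i + 1) 0 - PySem.List.pyGetD s i 0)) 0 0
       + PySem.List.pyGetD ((PySem.List.pyRange 0 m 1).map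
          (fun i => PySem.List.pyGetD s (i + 1) 0 - PySem.List.pyGetD s i 0)) 1 0)
    = (PySem.List.min?
        ((PySem.List.pyRange 0 ((((PySem.List.pyRange 0 m 1).map
            (fun i => PySem.List.pyGetD s (i + 1) 0 - PySem.List.pyGetD s i 0)).length : Int) - 1) 1).map
          (fun i => PySem.List.pyGetD s (i + 2) 0 - PySem.List.pyGetD s i 0)) (fun x => x)).getD 0 := by
  set dB := fun i => PySem.List.pyGetD s (i + 1) 0 - PySem.List.pyGetD s i 0 with hdB
  set D := (PySem.List.pyRange 0 m 1).map dB with hD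
  have hDlen : D.length = (m - 0).toNat := by
    simp [hD, PySem.List.length_pyRange_one]
  have hm2 : (D.length : Int) = m := by omega
  have hmm : 2 ≤ m := by omega
  have hP : ∀ i ∈ PySem.List.pyRange 0 ((D.length : Int) - 1) 1,
      PySem.List.pyGetD D i 0 + PySem.List.pyGetD D (i + 1) 0
        = PySem.List.pyGetD s (i + 2) 0 - PySem.List.pyGetD s i 0 := by
    intro i hi
    obtain ⟨h0, h1⟩ := PySem.List.mem_pyRange_one.mp hi
    rw [hD, PySem.List.pyGetD_map_pyRange_of_nonneg dB m i 0 h0 (by omega),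
        PySem.List.pyGetD_map_pyRange_of_nonneg dB m (i + 1) 0 (by omega) (by omega)]
    simp only [hdB, show i + 1 + 1 = i + 2 from by ring]
    ring
  rw [pv_fold_min_map _ _ (fun i => PySem.List.pyGetD s (i + 2) 0 - PySem.List.pyGetD s i 0) _ hP]
  have hsum0 : PySem.List.pyGetD D 0 0 + PySem.List.pyGetD D 1 0
      = PySem.List.pyGetD s (0 + 2) 0 - PySem.List.pyGetD s 0 0 := by
    rw [hD, PySem.List.pyGetD_map_pyRange_of_nonneg dB m 0 0 (by omega) (by omega),
        PySem.List.pyGetD_map_pyRange_of_nonneg dB m 1 0 (by omega) (by omega)]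
    simp only [hdB]
    norm_num
  have hK : (0 : Int) < (D.length : Int) - 1 := by omega
  rw [PySem.List.pyRange_one_cons hK]
  simp only [List.map_cons, List.foldl_cons, PySem.List.min?_id_cons, hsum0, Option.getD_some,
    min_self]

-- the adjacent differences and the two-apart spans of a list
def adjDiffs : List Int → List Int
  | a :: b :: t => (b - a) :: adjDiffs (b :: t)
  | _ => []

def spans : List Int → List Int
  | a :: b :: c :: t => (c - a) :: spans (b :: c :: t)
  | _ => []

theorem length_adjDiffs : ∀ l : List Int, (adjDiffs l).length = l.length - 1
  | [] => rfl
  | [_] => rfl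
  | _ :: b :: t => by
    simp only [adjDiffs, List.length_cons, length_adjDiffs (b :: t)]
    omega

theorem length_spans : ∀ l : List Int, (spans l).length = l.length - 2
  | [] => rfl
  | [_] => rfl
  | [_, _] => rfl
  | _ :: b :: c :: t => by
    simp only [spans, List.length_cons, length_spans (b :: c :: t)]
    omega

theorem adjDiffs_getD : ∀ (l : List Int) (i : Nat), i + 1 < l.length →
    (adjDiffs l).getD i 0 = l.getD (i + 1) 0 - l.getD i 0
  | a :: b :: t, 0, _ => by simp [adjDiffs]
  | a :: b :: t, i + 1, h => by
    have := adjDiffs_getD (b :: t) i (by simpa using Nat.lt_of_succ_lt_succ h)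
    simpa [adjDiffs] using this

theorem spans_getD : ∀ (l : List Int) (i : Nat), i + 2 < l.length →
    (spans l).getD i 0 = l.getD (i + 2) 0 - l.getD i 0
  | a :: b :: c :: t, 0, _ => by simp [spans]
  | a :: b :: c :: t, i + 1, h => by
    have := spans_getD (b :: c :: t) i (by simpa using Nat.lt_of_succ_lt_succ h)
    simpa [spans] using this

-- the last two elements B's fold has seen
def lastTwo (a b : Int) : List Int → Int × Int
  | [] => (a, b)
  | x :: t => lastTwo b x t

-- invariant of B's fused loop once two elements have been seen
theorem bFold_inv (l : List Int) (a b : Int) (me mo sp : Option Int) :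
    l.foldl bStep (me, mo, sp, some a, some b)
    = (((adjDiffs (b :: l)).filter (fun d => decide (PySem.Int.mod d 2 = 0))).foldl bUpd me,
       ((adjDiffs (b :: l)).filter (fun d => decide (PySem.Int.mod d 2 ≠ 0))).foldl bUpd mo,
       (spans (a :: b :: l)).foldl bUpd sp,
       some (lastTwo a b l).1, some (lastTwo a b l).2) := by
  induction l generalizing a b me mo sp with
  | nil => simp [adjDiffs, spans, lastTwo]
  | cons x t ih =>
    rw [List.foldl_cons]
    by_cases h : PySem.Int.mod (x - b) 2 = 0
    · have hx : (x - b) % 2 = 0 := by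
        have := PySem.Int.mod_eq_emod_of_pos (a := x - b) (b := 2) (by norm_num)
        omega
      have h2 : (2 : Int) ∣ (x - b) := Int.dvd_of_emod_eq_zero hx
      have hstep : bStep (me, mo, sp, some a, some b) x
          = (bUpd me (x - b), mo, bUpd sp (x - a), some b, some x) := by
        simp [bStep, hx]
      rw [hstep, ih]
      simp [adjDiffs, spans, lastTwo, hx, h2]
    · have hx : (x - b) % 2 = 1 := by
        have h1 := PySem.Int.mod_eq_emod_of_pos (a := x - b) (b := 2) (by norm_num)
        have h2 := Int.emod_two_eq (x - b)
        omega
      have h2 : ¬ (2 : Int) ∣ (x - b) := by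
        rw [Int.dvd_iff_emod_eq_zero]; omega
      have hstep : bStep (me, mo, sp, some a, some b) x
          = (me, bUpd mo (x - b), bUpd sp (x - a), some b, some x) := by
        simp [bStep, hx]
      rw [hstep, ih]
      simp [adjDiffs, spans, lastTwo, hx, h2]

-- B's three minima are min? of the diff/span lists
theorem bFold_mins : ∀ t : List Int,
    ((t.foldl bStep (none, none, none, none, none)).1,
     (t.foldl bStep (none, none, none, none, none)).2.1,
     (t.foldl bStep (none, none, none, none, none)).2.2.1)
    = (PySem.List.min? ((adjDiffs t).filter (fun d => decide (PySem.Int.mod d 2 = 0))) (fun x => x),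
       PySem.List.min? ((adjDiffs t).filter (fun d => decide (PySem.Int.mod d 2 ≠ 0))) (fun x => x),
       PySem.List.min? (spans t) (fun x => x))
  | [] => rfl
  | [x] => rfl
  | x :: y :: u => by
    by_cases h : PySem.Int.mod (y - x) 2 = 0
    · have hx : (y - x) % 2 = 0 := by
        have := PySem.Int.mod_eq_emod_of_pos (a := y - x) (b := 2) (by norm_num)
        omega
      have h2 : (2 : Int) ∣ (y - x) := Int.dvd_of_emod_eq_zero hx
      have hsteps : (x :: y :: u).foldl bStep (none, none, none, none, none)
          = u.foldl bStep (some (y - x), none, none, some x, some y) := by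
        simp [List.foldl_cons, bStep, hx, bUpd]
      rw [hsteps, bFold_inv]
      simp [adjDiffs, hx, h2, foldl_bUpd_none, foldl_bUpd_some]
    · have hx : (y - x) % 2 = 1 := by
        have h1 := PySem.Int.mod_eq_emod_of_pos (a := y - x) (b := 2) (by norm_num)
        have h2 := Int.emod_two_eq (y - x)
        omega
      have h2 : ¬ (2 : Int) ∣ (y - x) := by
        rw [Int.dvd_iff_emod_eq_zero]; omega
      have hsteps : (x :: y :: u).foldl bStep (none, none, none, none, none)
          = u.foldl bStep (none, some (y - x), none, some x, some y) := by
        simp [List.foldl_cons, bStep, hx, bUpd]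
      rw [hsteps, bFold_inv]
      simp [adjDiffs, hx, h2, foldl_bUpd_none, foldl_bUpd_some]

-- the diff list A indexes equals adjDiffs of the sorted prefix B streams over
theorem pv_L1 (s : List Int) (n : Int) (hn : n ≤ (s.length : Int) ∨ n ≤ 1) :
    (PySem.List.pyRange 0 (n - 1) 1).map
      (fun i => PySem.List.pyGetD s (i + 1) 0 - PySem.List.pyGetD s i 0)
    = adjDiffs (s.take n.toNat) := by
  have hlen1 : ((PySem.List.pyRange 0 (n - 1) 1).map
      (fun i => PySem.List.pyGetD s (i + 1) 0 - PySem.List.pyGetD s i 0)).length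
      = (n - 1).toNat := by
    simp [PySem.List.length_pyRange_one]
  have hlen2 : (adjDiffs (s.take n.toNat)).length = min n.toNat s.length - 1 := by
    simp [length_adjDiffs]
  apply List.ext_getElem
  · rw [hlen1, hlen2]; omega
  · intro i h1 h2
    have hi : i < (n - 1).toNat := by omega
    have hilen : (i : Int) + 1 < n := by omega
    have hns : n ≤ (s.length : Int) := by
      rcases hn with h | h
      · exact h
      · omega
    rw [List.getElem_map, PySem.List.getElem_pyRange_one]
    have hgi : PySem.List.pyGetD s ((0 : Int) + (i : Int)) 0 = s.getD i 0 := by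
      rw [PySem.List.pyGetD_eq_getElem _ 0 (by omega) (by omega)]
      rw [List.getD_eq_getElem s 0 (by omega)]
      congr 1
      omega
    have hgi1 : PySem.List.pyGetD s ((0 : Int) + (i : Int) + 1) 0 = s.getD (i + 1) 0 := by
      rw [PySem.List.pyGetD_eq_getElem _ 0 (by omega) (by omega)]
      rw [List.getD_eq_getElem s 0 (by omega)]
      congr 1
      omega
    rw [hgi, hgi1, ← List.getD_eq_getElem _ 0 h2,
        adjDiffs_getD _ i (by rw [List.length_take]; omega)]
    have ht1 : (s.take n.toNat).getD (i + 1) 0 = s.getD (i + 1) 0 := by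
      rw [List.getD_eq_getElem _ 0 (by rw [List.length_take]; omega),
          List.getElem_take, List.getD_eq_getElem s 0 (by omega)]
    have ht0 : (s.take n.toNat).getD i 0 = s.getD i 0 := by
      rw [List.getD_eq_getElem _ 0 (by rw [List.length_take]; omega),
          List.getElem_take, List.getD_eq_getElem s 0 (by omega)]
    rw [ht1, ht0]

-- the span list of A's fallback equals spans of the sorted prefix
theorem pv_L2 (s : List Int) (n : Int) (hn : n ≤ (s.length : Int) ∨ n ≤ 1) :
    (PySem.List.pyRange 0 (n - 2) 1).map
      (fun i => PySem.List.pyGetD s (i + 2) 0 - PySem.List.pyGetD s i 0)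
    = spans (s.take n.toNat) := by
  have hlen1 : ((PySem.List.pyRange 0 (n - 2) 1).map
      (fun i => PySem.List.pyGetD s (i + 2) 0 - PySem.List.pyGetD s i 0)).length
      = (n - 2).toNat := by
    simp [PySem.List.length_pyRange_one]
  have hlen2 : (spans (s.take n.toNat)).length = min n.toNat s.length - 2 := by
    simp [length_spans]
  apply List.ext_getElem
  · rw [hlen1, hlen2]; omega
  · intro i h1 h2
    have hi : i < (n - 2).toNat := by omega
    have hns : n ≤ (s.length : Int) := by
      rcases hn with h | h
      · exact h
      · omega
    rw [List.getElem_map, PySem.List.getElem_pyRange_one]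
    have hgi : PySem.List.pyGetD s ((0 : Int) + (i : Int)) 0 = s.getD i 0 := by
      rw [PySem.List.pyGetD_eq_getElem _ 0 (by omega) (by omega)]
      rw [List.getD_eq_getElem s 0 (by omega)]
      congr 1
      omega
    have hgi2 : PySem.List.pyGetD s ((0 : Int) + (i : Int) + 2) 0 = s.getD (i + 2) 0 := by
      rw [PySem.List.pyGetD_eq_getElem _ 0 (by omega) (by omega)]
      rw [List.getD_eq_getElem s 0 (by omega)]
      congr 1
      omega
    rw [hgi, hgi2, ← List.getD_eq_getElem _ 0 h2,
        spans_getD _ i (by rw [List.length_take]; omega)]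
    have ht2 : (s.take n.toNat).getD (i + 2) 0 = s.getD (i + 2) 0 := by
      rw [List.getD_eq_getElem _ 0 (by rw [List.length_take]; omega),
          List.getElem_take, List.getD_eq_getElem s 0 (by omega)]
    have ht0 : (s.take n.toNat).getD i 0 = s.getD i 0 := by
      rw [List.getD_eq_getElem _ 0 (by rw [List.length_take]; omega),
          List.getElem_take, List.getD_eq_getElem s 0 (by omega)]
    rw [ht2, ht0]

-- ===== VERDICT (by name: the statement is the Claim_ definition above) =====
theorem solution_spec : Claim_equal_solution := by
  intro n array _ hpre
  unfold Spec_solution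
  simp only [solution, solution_alt]
  have hl : (((PySem.List.sorted array (fun x => x) false).length : Int)) = (array.length : Int) := by
    exact_mod_cast congrArg (Nat.cast (R := Int))
      (PySem.List.length_sorted array (fun x => x) false)
  have hn : n ≤ ((PySem.List.sorted array (fun x => x) false).length : Int) ∨ n ≤ 1 := by
    rcases hpre with h | h
    · left; omega
    · right; exact h
  have habs : ∀ i ∈ PySem.List.pyRange 0 (n - 1) 1,
      |PySem.List.pyGetD (PySem.List.sorted array (fun x => x) false) (i + 1) 0
          - PySem.List.pyGetD (PySem.List.sorted array (fun x => x) false) i 0|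
        = PySem.List.pyGetD (PySem.List.sorted array (fun x => x) false) (i + 1) 0
          - PySem.List.pyGetD (PySem.List.sorted array (fun x => x) false) i 0 := by
    intro i hi
    obtain ⟨h0, h1⟩ := PySem.List.mem_pyRange_one.mp hi
    have hns : n ≤ ((PySem.List.sorted array (fun x => x) false).length : Int) := by
      rcases hn with h | h
      · exact h
      · omega
    rw [PySem.List.pyGetD_eq_getElem _ 0 (by omega) (by omega),
        PySem.List.pyGetD_eq_getElem _ 0 h0 (by omega)]
    have hmono := PySem.List.sorted_id_getElem_mono (xs := array)
      (p := i.toNat) (q := (i + 1).toNat) (by omega) (by omega)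
    exact abs_of_nonneg (sub_nonneg.mpr hmono)
  rw [pv_loopshape _ _ _ habs, pv_core]
  simp only [List.nil_append]
  rw [pv_foldl_minOpt_none, pv_foldl_minOpt_none]
  have hM := bFold_mins ((PySem.List.sorted array (fun x => x) false).take n.toNat)
  have hme := congrArg Prod.fst hM
  have hmo := congrArg (fun p : Option Int × Option Int × Option Int => p.2.1) hM
  have hsp := congrArg (fun p : Option Int × Option Int × Option Int => p.2.2) hM
  simp only at hme hmo hsp
  rw [hme, hmo, hsp]
  have hD1 := pv_L1 (PySem.List.sorted array (fun x => x) false) n hn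
  rw [← hD1]
  set D := (PySem.List.pyRange 0 (n - 1) 1).map
      (fun i => PySem.List.pyGetD (PySem.List.sorted array (fun x => x) false) (i + 1) 0
        - PySem.List.pyGetD (PySem.List.sorted array (fun x => x) false) i 0) with hD
  cases he : PySem.List.min? (D.filter (fun d => decide (PySem.Int.mod d 2 = 0))) (fun x => x) with
  | some m =>
    cases ho : PySem.List.min? (D.filter (fun d => decide (PySem.Int.mod d 2 ≠ 0))) (fun x => x) <;>
      simp
  | none =>
    have hall : D.filter (fun d => decide (PySem.Int.mod d 2 ≠ 0)) = D :=
      pv_filter_all D ((PySem.List.min?_eq_none_iff _ _).mp he)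
    rw [hall]
    have hDlen : D.length = (n - 1).toNat := by
      simp [hD, PySem.List.length_pyRange_one]
    by_cases hlen : D.length < 2
    · simp only [if_pos hlen]
      have hsp0 : spans ((PySem.List.sorted array (fun x => x) false).take n.toNat) = [] := by
        have := length_spans ((PySem.List.sorted array (fun x => x) false).take n.toNat)
        have hnl : ((PySem.List.sorted array (fun x => x) false).take n.toNat).length
            = min n.toNat (PySem.List.sorted array (fun x => x) false).length := by
          simp
        apply List.eq_nil_of_length_eq_zero
        omega
      rw [hsp0]
      cases ho : PySem.List.min? D (fun x => x) <;> rfl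
    · simp only [if_neg hlen]
      rw [hD, pv_fallback (PySem.List.sorted array (fun x => x) false) (n - 1)
        (by rw [← hD]; omega)]
      rw [← hD]
      have hb : ((D.length : Int)) - 1 = n - 2 := by omega
      rw [hb]
      rw [pv_L2 (PySem.List.sorted array (fun x => x) false) n hn]
      have hspne : spans ((PySem.List.sorted array (fun x => x) false).take n.toNat) ≠ [] := by
        have := length_spans ((PySem.List.sorted array (fun x => x) false).take n.toNat)
        have hnl : ((PySem.List.sorted array (fun x => x) false).take n.toNat).length
            = min n.toNat (PySem.List.sorted array (fun x => x) false).length := by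
          simp
        intro hnil
        rw [hnil] at this
        simp at this
        rcases hn with h | h <;> omega
      cases hsv : PySem.List.min? (spans ((PySem.List.sorted array (fun x => x) false).take n.toNat))
          (fun x => x) with
      | none => exact absurd ((PySem.List.min?_eq_none_iff _ _).mp hsv) hspne
      | some v =>
        cases ho : PySem.List.min? D (fun x => x) <;> rfl
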